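-- pv_equiv track=rewrite | github.com/pandix73/Python_learning | checkio/Elementary/index_power.py | index_power
-- ===== SOURCE A (Python) =====
-- def index_power(array, n):
--     """
--         Find Nth power of the element with index N.
--     """
--     if len(array) <= n:
--         return -1
--     elif n == 0:
--         return 1
--     else:
--         ans = 1
--         for i in range(0,n):
--             ans *= array[n]
--         return ans
-- ===== SOURCE B (Python) =====
-- def index_power(array, n):
--     if n >= len(array):
--         return -1
--     if n <= 0:
--         return 1
--     base = array[n]
--     result = 1
--     e = n
--     while e > 0:
--         if e & 1:
--             result *= base
--         base *= base
--         e >>= 1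
--     return result
-- ===== Notes on version B (the rewrite author's own statement) =====
-- stated objective: alternative
-- what changed: Replaces A's n-step repeated-multiplication loop with a hand-written square-and-multiply (binary exponentiation) loop over the bits of n, with n <= 0 short-circuited to 1 exactly as A's n==0 branch and empty range behave; intended as faster (O(log n) vs O(n) multiplications; a timing run measured 2-16x at large n but did not consistently confirm it).
import Mathlib
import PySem

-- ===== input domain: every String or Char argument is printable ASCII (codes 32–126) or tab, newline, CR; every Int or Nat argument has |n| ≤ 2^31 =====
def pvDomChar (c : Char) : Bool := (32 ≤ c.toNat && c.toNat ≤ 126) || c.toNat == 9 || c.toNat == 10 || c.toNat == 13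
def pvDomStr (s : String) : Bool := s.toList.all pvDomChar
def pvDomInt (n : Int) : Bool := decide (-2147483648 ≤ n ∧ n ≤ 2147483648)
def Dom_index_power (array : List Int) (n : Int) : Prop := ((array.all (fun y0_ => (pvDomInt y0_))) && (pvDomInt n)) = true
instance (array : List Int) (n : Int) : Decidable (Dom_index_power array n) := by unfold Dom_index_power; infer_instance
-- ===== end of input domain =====

-- B replaces A's n-step multiplication loop by a hand-written square-and-multiply loop over the bits of n (n ≤ 0 short-circuited to 1).

-- ===== PORT A =====
-- the loop `ans *= array[n]` over range(0,n); for n < 0 the range is empty so array[n]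
-- is never read (the getD 0 default is then unreachable, as in Python)
def index_power (array : List Int) (n : Int) : Int :=
  if array.length ≤ n then -1
  else if n = 0 then 1
  else (PySem.List.pyRange 0 n 1).foldl (fun ans _ => ans * ((PySem.List.pyGet? array n).getD 0)) 1

-- ===== PORT B =====
-- Source B's while-loop `while e > 0: if e & 1: result *= base; base *= base; e >>= 1`,
-- as the obvious recursion on the (nonnegative) exponent
def ipowLoop (base result : Int) (e : Nat) : Int :=
  if e = 0 then result
  else ipowLoop (base * base) (if e % 2 = 1 then result * base else result) (e / 2)

def index_power_alt (array : List Int) (n : Int) : Int :=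
  if n ≥ array.length then -1
  else if n ≤ 0 then 1
  else ipowLoop ((PySem.List.pyGet? array n).getD 0) 1 n.toNat

-- ===== PRECONDITION & SPEC =====
def Spec_index_power (array : List Int) (n : Int) (out : Int) : Prop := out = index_power_alt array n
instance (array : List Int) (n : Int) (out : Int) : Decidable (Spec_index_power array n out) := by unfold Spec_index_power; infer_instance

-- ===== CLAIM (what is proved, stated in full; the proofs are below) =====
def Claim_equal_index_power : Prop := ∀ (array : List Int) (n : Int), Dom_index_power array n → Spec_index_power array n (index_power array n)

-- ===== LEMMAS AND PROOFS =====
theorem ipowLoop_eq (e : Nat) : ∀ (base result : Int), ipowLoop base result e = result * base ^ e := by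
  induction e using Nat.strong_induction_on with
  | _ e ih =>
    intro base result
    rw [ipowLoop]
    by_cases h0 : e = 0
    · simp [h0]
    · rw [if_neg h0, ih (e / 2) (Nat.div_lt_self (Nat.pos_of_ne_zero h0) (by norm_num))]
      have hb : (base * base) ^ (e / 2) = base ^ (2 * (e / 2)) := by
        rw [← pow_two, ← pow_mul]
      by_cases hp : e % 2 = 1
      · have he : e = 2 * (e / 2) + 1 := by omega
        rw [if_pos hp, hb]
        conv_rhs => rw [he]
        rw [pow_succ]; ring
      · have he : e = 2 * (e / 2) := by omega
        rw [if_neg hp, hb, ← he]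

theorem foldl_mul_const (l : List Int) (c x : Int) :
    l.foldl (fun ans _ => ans * c) x = x * c ^ l.length := by
  induction l generalizing x with
  | nil => simp
  | cons a t ih => simp [List.foldl, ih, pow_succ]; ring

-- ===== VERDICT (by name: the statement is the Claim_ definition above) =====
theorem index_power_spec : Claim_equal_index_power := by
  intro array n _
  unfold Spec_index_power index_power index_power_alt
  simp only [ge_iff_le]
  split_ifs with h1 h2 h3 h3
  · rfl
  · rfl
  · omega
  · -- n < 0: range(0,n) is empty, so A's loop returns 1, like B's short circuit
    have : PySem.List.pyRange 0 n 1 = [] := by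
      simp [PySem.List.pyRange_one]; omega
    simp [this]
  · rw [foldl_mul_const, PySem.List.length_pyRange_one, ipowLoop_eq]
    simp
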